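-- pv_equiv track=rewrite | github.com/marialysyuk/Google-Kick-Start | 2020/Round B/Robot Path Decoding/Robot Path Decoding.py | robot_path
-- ===== SOURCE A (Python) =====
-- def robot_path(string):
--     N = 0
--     W = 0
--     E = 0
--     S = 0
--     tempN = 0
--     tempW = 0
--     tempS = 0
--     tempE = 0
--     nums = []
--     for elem in string:
--         if elem.isdigit():
--             nums.append(int(elem))
--         elif elem == '(':
--             continue
--         elif elem == ')':
--             nums.pop()
--         else:
--             if elem == 'N':
--                 tempN +=1
--                 for elem in nums:
--                     tempN *= elem
--                 N += tempN
--                 tempN = 0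
--             if elem == 'W':
--                 tempW +=1
--                 for elem in nums:
--                     tempW *= elem
--                 W += tempW
--                 tempW = 0
--             if elem == 'E':
--                 tempE +=1
--                 for elem in nums:
--                     tempE *= elem
--                 E += tempE
--                 tempE = 0
--             if elem == 'S':
--                 tempS +=1
--                 for elem in nums:
--                     tempS *= elem
--                 S += tempS
--                 tempS = 0
--     S = S % 1000000000
--     N = N % 1000000000
--     W = W % 1000000000
--     E = E % 1000000000
--     result_abs = 1+E-W
--     if result_abs <= 0:
--         result_abs += 1000000000
--     result_ord = 1+S-N
--     if result_ord <= 0: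
--         result_ord += 1000000000
--     return result_abs, result_ord
-- ===== SOURCE B (Python) =====
-- def robot_path(string):
--     # Single pass keeping a stack of running multiplier products mod 1e9:
--     # push multiplies the top once, pop restores the previous product, so there
--     # is no inner loop over the multiplier stack and no huge exact products.
--     M = 1000000000
--     prods = [1]          # prods[-1] = product of all open multipliers, mod M
--     x = 0                # (E - W) displacement, mod M
--     y = 0                # (S - N) displacement, mod M
--     for c in string:
--         if c.isdigit():
--             prods.append(prods[-1] * int(c) % M)
--         elif c == ')':
--             prods.pop()
--         elif c == 'E':
--             x = (x + prods[-1]) % M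
--         elif c == 'W':
--             x = (x - prods[-1]) % M
--         elif c == 'S':
--             y = (y + prods[-1]) % M
--         elif c == 'N':
--             y = (y - prods[-1]) % M
--     return x + 1, y + 1
-- ===== Notes on version B (the rewrite author's own statement) =====
-- stated objective: alternative
-- what changed: Instead of recomputing the exact bignum product of the whole multiplier stack for every move character, B keeps a stack of running products modulo 1e9 updated in O(1) per push/pop and accumulates the two signed displacements modulo 1e9 in a single pass.
import Mathlib
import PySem

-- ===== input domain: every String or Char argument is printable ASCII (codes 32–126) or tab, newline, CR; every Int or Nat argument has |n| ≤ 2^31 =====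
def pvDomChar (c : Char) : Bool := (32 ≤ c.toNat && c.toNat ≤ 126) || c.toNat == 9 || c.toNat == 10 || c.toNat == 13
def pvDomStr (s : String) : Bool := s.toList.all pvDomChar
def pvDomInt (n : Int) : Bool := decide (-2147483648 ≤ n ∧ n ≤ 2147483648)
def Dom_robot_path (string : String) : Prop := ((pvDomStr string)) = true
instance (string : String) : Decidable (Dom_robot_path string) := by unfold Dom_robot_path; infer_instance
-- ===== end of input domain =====

-- B replaces A's per-move rescan of the multiplier stack (with exact bignum products)
-- by an O(1)-per-character stack of running products modulo 1e9 (objective: alternative).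

-- int(c) for a digit character (exact on ASCII digits, the only chars reaching it)
def pvDigitVal (c : Char) : Int := (c.toNat : Int) - 48

-- ===== PORT A =====
-- one iteration of A's for-loop; state = (N, W, E, S, nums); none = IndexError from nums.pop()
def robotStepA (st : Option (Int × Int × Int × Int × List Int)) (c : Char) :
    Option (Int × Int × Int × Int × List Int) :=
  match st with
  | none => none
  | some (n, w, e, s, nums) =>
    if PySem.Chars.isdigit c then some (n, w, e, s, nums ++ [pvDigitVal c])
    else if c = '(' then some (n, w, e, s, nums)
    else if c = ')' then
      match PySem.List.pop? nums with
      | none => none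
      | some (_, rest) => some (n, w, e, s, rest)
    else
      -- tempX += 1; for elem in nums: tempX *= elem; X += tempX  (for each of N/W/E/S)
      let n := if c = 'N' then n + List.foldl (· * ·) 1 nums else n
      let w := if c = 'W' then w + List.foldl (· * ·) 1 nums else w
      let e := if c = 'E' then e + List.foldl (· * ·) 1 nums else e
      let s := if c = 'S' then s + List.foldl (· * ·) 1 nums else s
      some (n, w, e, s, nums)

def robot_path (string : String) : List Int :=
  match string.toList.foldl robotStepA (some (0, 0, 0, 0, [])) with
  | none => []   -- unreachable under Pre_robot_path (Python raises IndexError here)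
  | some (n, w, e, s, _) =>
    let s := PySem.Int.mod s 1000000000
    let n := PySem.Int.mod n 1000000000
    let w := PySem.Int.mod w 1000000000
    let e := PySem.Int.mod e 1000000000
    let ra := 1 + e - w
    let ra := if ra ≤ 0 then ra + 1000000000 else ra
    let ro := 1 + s - n
    let ro := if ro ≤ 0 then ro + 1000000000 else ro
    [ra, ro]

-- ===== PORT B =====
-- one iteration of Source B's loop; state = (x, y, prods); the stack prods is kept
-- top-first (head = prods[-1]); none = IndexError
def robotStepB (st : Option (Int × Int × List Int)) (c : Char) :
    Option (Int × Int × List Int) :=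
  match st with
  | none => none
  | some (x, y, prods) =>
    if PySem.Chars.isdigit c then
      match prods with
      | [] => none
      | p :: _ => some (x, y, PySem.Int.mod (p * pvDigitVal c) 1000000000 :: prods)
    else if c = ')' then
      match prods with
      | [] => none
      | _ :: rest => some (x, y, rest)
    else if c = 'E' then
      match prods with
      | [] => none
      | p :: _ => some (PySem.Int.mod (x + p) 1000000000, y, prods)
    else if c = 'W' then
      match prods with
      | [] => none
      | p :: _ => some (PySem.Int.mod (x - p) 1000000000, y, prods)
    else if c = 'S' then
      match prods with
      | [] => none
      | p :: _ => some (x, PySem.Int.mod (y + p) 1000000000, prods)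
    else if c = 'N' then
      match prods with
      | [] => none
      | p :: _ => some (x, PySem.Int.mod (y - p) 1000000000, prods)
    else some (x, y, prods)

def robot_path_alt (string : String) : List Int :=
  match string.toList.foldl robotStepB (some (0, 0, [1])) with
  | none => []   -- unreachable under Pre_robot_path
  | some (x, y, _) => [x + 1, y + 1]

-- ===== PRECONDITION & SPEC =====
-- Pre_ excludes exactly the strings in which some ')' has no matching previously
-- pushed digit: there Python A raises IndexError on nums.pop().
def Pre_robot_path (string : String) : Prop :=
  ∀ n ∈ List.range (string.toList.length + 1),
    (string.toList.take n).countP (· == ')') ≤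
      (string.toList.take n).countP PySem.Chars.isdigit
instance (string : String) : Decidable (Pre_robot_path string) := by
  unfold Pre_robot_path; infer_instance

def pvWitness_robot_path : String := "2(3(NW)S)E"

def Spec_robot_path (string : String) (out : List Int) : Prop := out = robot_path_alt string
instance (string : String) (out : List Int) : Decidable (Spec_robot_path string out) := by
  unfold Spec_robot_path; infer_instance

-- ===== CLAIM (what is proved, stated in full; the proofs are below) =====
def Claim_equal_robot_path : Prop :=
  ∀ (string : String), Dom_robot_path string → Pre_robot_path string →
    Spec_robot_path string (robot_path string)

-- ===== LEMMAS AND PROOFS =====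

theorem pymod_eq (a : Int) : PySem.Int.mod a 1000000000 = a % 1000000000 :=
  PySem.Int.mod_eq_emod_of_pos (by norm_num)

-- the stack of running products mod 1e9, indexed by the REVERSED multiplier list
def stackOf : List Int → List Int
  | [] => [1]
  | d :: ds => PySem.Int.mod ((stackOf ds).headD 1 * d) 1000000000 :: stackOf ds

theorem stackOf_eq (rn : List Int) :
    ∃ t, stackOf rn = (rn.prod % 1000000000) :: t := by
  induction rn with
  | nil => exact ⟨[], rfl⟩
  | cons d ds ih =>
    obtain ⟨t, ht⟩ := ih
    refine ⟨stackOf ds, ?_⟩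
    simp only [stackOf, ht, List.headD_cons, pymod_eq, List.prod_cons]
    conv_lhs => rw [Int.mul_emod]
    conv_rhs => rw [Int.mul_emod]
    simp [Int.emod_emod_of_dvd, Int.mul_comm]

theorem foldl_mul_eq_prod (l : List Int) : List.foldl (· * ·) 1 l = l.prod :=
  (List.prod_eq_foldl).symm

theorem adj_eq (a b : Int) :
    (if 1 + a % 1000000000 - b % 1000000000 ≤ 0
      then 1 + a % 1000000000 - b % 1000000000 + 1000000000
      else 1 + a % 1000000000 - b % 1000000000) = (a - b) % 1000000000 + 1 := by
  split_ifs <;> omega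

theorem robot_loop (cs : List Char) :
    ∀ (n w e s x y : Int) (nums : List Int),
      (∀ k : Nat, (cs.take k).countP (· == ')') ≤
          (cs.take k).countP PySem.Chars.isdigit + nums.length) →
      x = (e - w) % 1000000000 → y = (s - n) % 1000000000 →
      ∃ n' w' e' s' nums',
        List.foldl robotStepA (some (n, w, e, s, nums)) cs = some (n', w', e', s', nums') ∧
        List.foldl robotStepB (some (x, y, stackOf nums.reverse)) cs =
          some ((e' - w') % 1000000000, (s' - n') % 1000000000, stackOf nums'.reverse) := by
  induction cs with
  | nil =>
    intro n w e s x y nums hcnt hx hy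
    exact ⟨n, w, e, s, nums, rfl, by subst hx; subst hy; rfl⟩
  | cons c cs ih =>
    intro n w e s x y nums hcnt hx hy
    obtain ⟨t, ht⟩ := stackOf_eq nums.reverse
    simp only [List.foldl_cons]
    by_cases hd : PySem.Chars.isdigit c = true
    · -- digit: push
      have hcne : ¬ (c = ')') := by rintro rfl; exact absurd hd (by decide)
      rw [show robotStepA (some (n, w, e, s, nums)) c
            = some (n, w, e, s, nums ++ [pvDigitVal c]) by simp [robotStepA, hd],
          show robotStepB (some (x, y, stackOf nums.reverse)) c
            = some (x, y, stackOf ((nums ++ [pvDigitVal c]).reverse)) by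
              rw [ht]
              simp only [robotStepB, hd, if_true, List.reverse_append, List.reverse_cons,
                List.reverse_nil, List.nil_append, List.singleton_append, stackOf, ht,
                List.headD_cons]]
      apply ih _ _ _ _ _ _ _ _ hx hy
      intro k
      have h2 := hcnt (k + 1)
      simp [List.take_succ_cons, hd, hcne] at h2 ⊢
      omega
    · have hd' : PySem.Chars.isdigit c = false := by simpa using hd
      by_cases hop : c = '('
      · -- '(' : both unchanged
        subst hop
        rw [show robotStepA (some (n, w, e, s, nums)) '('
              = some (n, w, e, s, nums) from rfl,
            show robotStepB (some (x, y, stackOf nums.reverse)) '('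
              = some (x, y, stackOf nums.reverse) from rfl]
        apply ih _ _ _ _ _ _ _ _ hx hy
        intro k
        have h2 := hcnt (k + 1)
        simp only [List.take_succ_cons, List.countP_cons] at h2
        simpa using h2
      · by_cases hcl : c = ')'
        · -- ')' : pop
          subst hcl
          have hne : nums ≠ [] := by
            have h1 := hcnt 1
            simp [List.countP_cons] at h1
            intro h; rw [h] at h1; simp [hd'] at h1
          have hsplit : nums.dropLast ++ [nums.getLast hne] = nums :=
            List.dropLast_append_getLast hne
          have hpop : PySem.List.pop? nums = some (nums.getLast hne, nums.dropLast) := by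
            conv_lhs => rw [← hsplit]
            exact PySem.List.pop?_last _ _
          have hrev : nums.reverse = nums.getLast hne :: nums.dropLast.reverse := by
            conv_lhs => rw [← hsplit]
            simp
          rw [show robotStepA (some (n, w, e, s, nums)) ')'
                = some (n, w, e, s, nums.dropLast) by simp [robotStepA, hpop, hd'],
              show robotStepB (some (x, y, stackOf nums.reverse)) ')'
                = some (x, y, stackOf nums.dropLast.reverse) by rw [hrev]; rfl]
          apply ih _ _ _ _ _ _ _ _ hx hy
          intro k
          have h2 := hcnt (k + 1)
          have hlen : nums.dropLast.length + 1 = nums.length := by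
            conv_rhs => rw [← hsplit]
            simp
          simp [List.take_succ_cons, hd'] at h2 ⊢
          omega
        · -- a move letter or an ignored character
          have hcnt' : ∀ k : Nat, ((cs.take k).countP (· == ')')) ≤
              (cs.take k).countP PySem.Chars.isdigit + nums.length := by
            intro k
            have h2 := hcnt (k + 1)
            have hcne : (c == ')') = false := by simpa using hcl
            simp [List.take_succ_cons, hd', hcne] at h2
            omega
          have hprod : nums.reverse.prod % 1000000000
              = (List.foldl (· * ·) 1 nums) % 1000000000 := by
            rw [foldl_mul_eq_prod, List.prod_reverse]
          by_cases hNc : c = 'N'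
          · subst hNc
            rw [show robotStepA (some (n, w, e, s, nums)) 'N'
                  = some (n + List.foldl (· * ·) 1 nums, w, e, s, nums) from rfl,
                ht,
                show robotStepB (some (x, y, nums.reverse.prod % 1000000000 :: t)) 'N'
                  = some (x, PySem.Int.mod (y - nums.reverse.prod % 1000000000) 1000000000,
                      nums.reverse.prod % 1000000000 :: t) from rfl, ← ht]
            exact ih _ _ _ _ _ _ _ hcnt' hx (by rw [hy, pymod_eq, hprod]; omega)
          by_cases hWc : c = 'W'
          · subst hWc
            rw [show robotStepA (some (n, w, e, s, nums)) 'W'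
                  = some (n, w + List.foldl (· * ·) 1 nums, e, s, nums) from rfl,
                ht,
                show robotStepB (some (x, y, nums.reverse.prod % 1000000000 :: t)) 'W'
                  = some (PySem.Int.mod (x - nums.reverse.prod % 1000000000) 1000000000, y,
                      nums.reverse.prod % 1000000000 :: t) from rfl, ← ht]
            exact ih _ _ _ _ _ _ _ hcnt' (by rw [hx, pymod_eq, hprod]; omega) hy
          by_cases hEc : c = 'E'
          · subst hEc
            rw [show robotStepA (some (n, w, e, s, nums)) 'E'
                  = some (n, w, e + List.foldl (· * ·) 1 nums, s, nums) from rfl,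
                ht,
                show robotStepB (some (x, y, nums.reverse.prod % 1000000000 :: t)) 'E'
                  = some (PySem.Int.mod (x + nums.reverse.prod % 1000000000) 1000000000, y,
                      nums.reverse.prod % 1000000000 :: t) from rfl, ← ht]
            exact ih _ _ _ _ _ _ _ hcnt' (by rw [hx, pymod_eq, hprod]; omega) hy
          by_cases hSc : c = 'S'
          · subst hSc
            rw [show robotStepA (some (n, w, e, s, nums)) 'S'
                  = some (n, w, e, s + List.foldl (· * ·) 1 nums, nums) from rfl,
                ht,
                show robotStepB (some (x, y, nums.reverse.prod % 1000000000 :: t)) 'S'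
                  = some (x, PySem.Int.mod (y + nums.reverse.prod % 1000000000) 1000000000,
                      nums.reverse.prod % 1000000000 :: t) from rfl, ← ht]
            exact ih _ _ _ _ _ _ _ hcnt' hx (by rw [hy, pymod_eq, hprod]; omega)
          · rw [show robotStepA (some (n, w, e, s, nums)) c
                  = some (n, w, e, s, nums) by
                    simp [robotStepA, hd', hop, hcl, hNc, hWc, hEc, hSc],
                show robotStepB (some (x, y, stackOf nums.reverse)) c
                  = some (x, y, stackOf nums.reverse) by
                    simp [robotStepB, hd', hcl, hNc, hWc, hEc, hSc]]
            exact ih _ _ _ _ _ _ _ hcnt' hx hy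

-- ===== VERDICT (by name: the statement is the Claim_ definition above) =====
theorem robot_path_spec : Claim_equal_robot_path := by
  intro string _ hpre
  unfold Spec_robot_path
  have hcnt : ∀ k : Nat, ((string.toList.take k).countP (· == ')')) ≤
      (string.toList.take k).countP PySem.Chars.isdigit + ([] : List Int).length := by
    intro k
    simp only [List.length_nil, Nat.add_zero]
    by_cases h : k ≤ string.toList.length
    · exact hpre k (List.mem_range.mpr (by omega))
    · rw [List.take_of_length_le (by omega)]
      have := hpre string.toList.length (List.mem_range.mpr (by omega))
      rwa [List.take_length] at this
  obtain ⟨n', w', e', s', nums', hA, hB⟩ :=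
    robot_loop string.toList 0 0 0 0 0 0 [] hcnt (by norm_num) (by norm_num)
  unfold robot_path robot_path_alt
  rw [show stackOf (([] : List Int).reverse) = [1] from rfl] at hB
  rw [hA, hB]
  simp only [pymod_eq, adj_eq]
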